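-- pv_equiv track=rewrite | github.com/git-yuliang/eclipse2023 | _6.0_first_slicer_wavelet_analysis.py | find_transition_index
-- ===== SOURCE A (Python) =====
-- def find_transition_index(a, b):
--     """
--     Finds the first index `i` such that for all j >= i, a[j] > b[j].
--     Returns -1 if no such index exists.
--     """
--     # Ensure a and b have the same length
--     if len(a) != len(b):
--         raise ValueError("a and b must have the same length.")
--
--     # Start from the first index and track if the condition is met
--     for i in range(len(a)):
--         if a[i] > b[i]:
--             # Check if all subsequent elements satisfy a[j] > b[j]
--             if all(a[j] > b[j] for j in range(i, len(a))):
--                 return i  # Return the first index where condition holds for all subsequent elements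
--
--     # If no such index is found, return -1
--     return -1
-- ===== SOURCE B (Python) =====
-- def find_transition_index(a, b):
--     if len(a) != len(b):
--         raise ValueError("a and b must have the same length.")
--     # single backward scan: walk left from the end while a[i] > b[i];
--     # the answer is the index just after the last failure (or -1 if the
--     # last element already fails / the list is empty)
--     i = len(a) - 1
--     while i >= 0 and a[i] > b[i]:
--         i -= 1
--     return i + 1 if i + 1 < len(a) else -1
-- ===== Notes on version B (the rewrite author's own statement) =====
-- stated objective: faster
-- what changed: Replaces A's forward scan with a quadratic re-check of the whole suffix at each candidate by a single backward scan that finds the last index where a[i] <= b[i] and returns the index after it (-1 if none qualifies).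
import Mathlib
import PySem

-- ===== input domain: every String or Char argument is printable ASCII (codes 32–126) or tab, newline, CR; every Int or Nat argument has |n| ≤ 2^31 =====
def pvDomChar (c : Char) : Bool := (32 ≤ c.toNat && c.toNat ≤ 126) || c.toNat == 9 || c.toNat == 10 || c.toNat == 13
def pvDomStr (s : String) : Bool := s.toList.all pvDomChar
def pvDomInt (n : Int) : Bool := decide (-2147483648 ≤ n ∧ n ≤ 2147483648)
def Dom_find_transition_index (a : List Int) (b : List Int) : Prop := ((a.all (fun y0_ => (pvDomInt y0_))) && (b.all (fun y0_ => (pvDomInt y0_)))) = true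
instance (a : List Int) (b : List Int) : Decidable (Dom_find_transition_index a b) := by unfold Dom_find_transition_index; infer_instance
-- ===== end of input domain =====

-- B replaces A's quadratic forward scan (re-checking the whole suffix at each
-- candidate) by a single backward scan for the last index where a[i] <= b[i].


-- ===== PORT A =====
-- a[k] > b[k] at (in-range) index k
def pvGT (a b : List Int) (k : Nat) : Bool :=
  (PySem.List.pyGet? a (k : Int)).getD 0 > (PySem.List.pyGet? b (k : Int)).getD 0

-- `all(a[j] > b[j] for j in range(i, len(a)))`
def pvAllSuff (a b : List Int) (j : Nat) : Bool :=
  if j < a.length then pvGT a b j && pvAllSuff a b (j + 1) else true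
termination_by a.length - j

-- `for i in range(len(a)): …` with the early return
def pvAGo (a b : List Int) (i : Nat) : Int :=
  if i < a.length then
    if pvGT a b i then
      if pvAllSuff a b i then (i : Int) else pvAGo a b (i + 1)
    else pvAGo a b (i + 1)
  else -1
termination_by a.length - i

-- port of A (the ValueError on unequal lengths is excluded by Pre_)
def find_transition_index (a : List Int) (b : List Int) : Int := pvAGo a b 0

-- ===== PORT B =====
-- `while i >= 0 and a[i] > b[i]: i -= 1`; state k = i + 1, returns final i + 1
def pvBLoop (a b : List Int) : Nat → Nat
  | 0 => 0
  | k + 1 => if pvGT a b k then pvBLoop a b k else k + 1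

def find_transition_index_alt (a : List Int) (b : List Int) : Int :=
  let r := pvBLoop a b a.length
  if r < a.length then (r : Int) else -1

-- ===== PRECONDITION & SPEC =====
-- A raises ValueError when the lengths differ; Pre_ excludes exactly that.
def Pre_find_transition_index (a : List Int) (b : List Int) : Prop := a.length = b.length
instance (a : List Int) (b : List Int) : Decidable (Pre_find_transition_index a b) := by
  unfold Pre_find_transition_index; infer_instance

def pvWitness_find_transition_index : List Int × List Int := ([2, 1], [1, 0])

def Spec_find_transition_index (a : List Int) (b : List Int) (out : Int) : Prop := out = find_transition_index_alt a b
instance (a : List Int) (b : List Int) (out : Int) : Decidable (Spec_find_transition_index a b out) := by unfold Spec_find_transition_index; infer_instance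

-- ===== CLAIM (what is proved, stated in full; the proofs are below) =====
def Claim_equal_find_transition_index : Prop := ∀ (a : List Int) (b : List Int), Dom_find_transition_index a b → Pre_find_transition_index a b → Spec_find_transition_index a b (find_transition_index a b)

-- ===== LEMMAS AND PROOFS =====

theorem pvBLoop_le (a b : List Int) (k : Nat) : pvBLoop a b k ≤ k := by
  induction k with
  | zero => simp [pvBLoop]
  | succ k ih => simp only [pvBLoop]; split <;> omega

-- everything from pvBLoop k up to k satisfies pvGT
theorem pvBLoop_suffix (a b : List Int) (k : Nat) :
    ∀ j, pvBLoop a b k ≤ j → j < k → pvGT a b j = true := by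
  induction k with
  | zero => intro j h1 h2; omega
  | succ k ih =>
    intro j h1 h2
    simp only [pvBLoop] at h1
    by_cases hg : pvGT a b k = true
    · rw [if_pos hg] at h1
      rcases Nat.lt_or_ge j k with h | h
      · exact ih j h1 h
      · have : j = k := by omega
        subst this; exact hg
    · rw [if_neg hg] at h1; omega

-- pvBLoop k is minimal among starts of all-pvGT suffixes of [0,k)
theorem pvBLoop_least (a b : List Int) (k : Nat) (m : Nat)
    (h : ∀ j, m ≤ j → j < k → pvGT a b j = true) : pvBLoop a b k ≤ m := by
  induction k with
  | zero => simp [pvBLoop]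
  | succ k ih =>
    simp only [pvBLoop]
    by_cases hm : m ≤ k
    · have hg : pvGT a b k = true := h k hm (by omega)
      rw [if_pos hg]
      exact ih (fun j hj1 hj2 => h j hj1 (by omega))
    · split <;> [exact le_trans (pvBLoop_le a b k) (by omega); omega]

theorem pvAllSuff_iff (a b : List Int) (j : Nat) :
    pvAllSuff a b j = true ↔ ∀ k, j ≤ k → k < a.length → pvGT a b k = true := by
  induction hj : a.length - j using Nat.strong_induction_on generalizing j with
  | _ d ih =>
    rw [pvAllSuff]
    by_cases h : j < a.length
    · rw [if_pos h]
      have ihj := ih (a.length - (j + 1)) (by omega) (j + 1) rfl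
      constructor
      · intro hall k hk1 hk2
        simp only [Bool.and_eq_true] at hall
        rcases Nat.eq_or_lt_of_le hk1 with rfl | hlt
        · exact hall.1
        · exact ihj.mp hall.2 k hlt hk2
      · intro hall
        simp only [Bool.and_eq_true]
        exact ⟨hall j le_rfl h,
          ihj.mpr (fun k hk1 hk2 => hall k (by omega) hk2)⟩
    · rw [if_neg h]
      constructor
      · intro _ k hk1 hk2; omega
      · intro _; rfl

-- main invariant: for s ≤ r := pvBLoop a.length, the forward scan from s lands on r
theorem pvAGo_char (a b : List Int) (s : Nat) (hs : s ≤ pvBLoop a b a.length) :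
    pvAGo a b s = if pvBLoop a b a.length < a.length then (pvBLoop a b a.length : Int) else -1 := by
  set r := pvBLoop a b a.length with hr
  induction hd : a.length - s using Nat.strong_induction_on generalizing s with
  | _ d ih =>
    have hrle : r ≤ a.length := pvBLoop_le a b a.length
    rw [pvAGo]
    rcases Nat.eq_or_lt_of_le hs with rfl | hlt
    · -- s = r
      by_cases h : r < a.length
      · have hg : pvGT a b r = true := pvBLoop_suffix a b a.length r le_rfl h
        have hall : pvAllSuff a b r = true :=
          (pvAllSuff_iff a b r).mpr (fun k hk1 hk2 => pvBLoop_suffix a b a.length k hk1 hk2)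
        rw [if_pos h, if_pos hg, if_pos hall, if_pos h]
      · rw [if_neg h, if_neg h]
    · -- s < r
      have hsl : s < a.length := by omega
      have hnall : pvAllSuff a b s ≠ true := by
        intro hall
        have := pvBLoop_least a b a.length s ((pvAllSuff_iff a b s).mp hall)
        omega
      have hrec : pvAGo a b (s + 1) = if r < a.length then (r : Int) else -1 :=
        ih (a.length - (s + 1)) (by omega) (s + 1) (by omega) rfl
      rw [if_pos hsl]
      by_cases hg : pvGT a b s = true
      · rw [if_pos hg, if_neg hnall, hrec]
      · rw [if_neg hg, hrec]

-- ===== VERDICT (by name: the statement is the Claim_ definition above) =====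
theorem find_transition_index_spec : Claim_equal_find_transition_index := by
  intro a b _ _
  unfold Spec_find_transition_index find_transition_index find_transition_index_alt
  simpa using pvAGo_char a b 0 (Nat.zero_le _)
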